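-- pv_equiv track=rewrite | github.com/SDET-SOLOMAN/code_wars_python | kata_6s/simple_fun_cipher26.py | cipher26
-- ===== SOURCE A (Python) =====
-- def cipher26(message):
--     calculator = 0
--     re = ""
--     number = 97
--     alphabet = 26
--
--     for char in message:
--         char = (ord(char) - number - calculator) % alphabet
--         re += chr(char + number)
--         calculator += char
--     return re
-- ===== SOURCE B (Python) =====
-- def cipher26(message):
--     # decoded[i] = (ord(message[i]) - ord(message[i-1])) % 26, with an implicit 'a' before the first char:
--     # the cumulative decode-sum collapses mod 26 to the previous input code point.
--     return "".join(chr((ord(c) - ord(p)) % 26 + 97) for p, c in zip("a" + message, message))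
-- ===== Notes on version B (the rewrite author's own statement) =====
-- stated objective: simpler
-- what changed: B removes A's stateful loop with a cumulative decoded-sum accumulator and instead zips the message with itself shifted by one ('a'-prefixed), mapping each adjacent pair to chr((ord(cur)-ord(prev))%26+97); correct because the running decode-sum collapses mod 26 to the previous input code point.
import Mathlib
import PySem

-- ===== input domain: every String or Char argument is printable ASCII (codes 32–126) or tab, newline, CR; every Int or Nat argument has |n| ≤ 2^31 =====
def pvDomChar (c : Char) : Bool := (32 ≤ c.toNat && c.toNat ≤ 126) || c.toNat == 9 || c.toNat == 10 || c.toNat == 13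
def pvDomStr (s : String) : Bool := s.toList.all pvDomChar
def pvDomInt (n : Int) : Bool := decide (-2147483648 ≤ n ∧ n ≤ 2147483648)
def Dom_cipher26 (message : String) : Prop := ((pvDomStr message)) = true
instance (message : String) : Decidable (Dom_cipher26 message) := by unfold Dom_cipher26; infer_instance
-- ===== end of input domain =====

-- B replaces A's stateful loop (cumulative decoded-sum accumulator) by a zip of the
-- message with its one-shifted self, mapping adjacent pairs; objective: simpler.


-- ===== PORT A =====
-- state = (calculator, re); char := (ord c - 97 - calculator) % 26; re += chr(char+97); calculator += char
def cipher26 (message : String) : String :=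
  let st := message.toList.foldl
    (fun (st : Int × List Char) c =>
      let d := PySem.Int.mod ((c.toNat : Int) - 97 - st.1) 26
      (st.1 + d, st.2 ++ [Char.ofNat (d + 97).toNat]))
    (0, [])
  String.ofList st.2

-- ===== PORT B =====
-- zip("a" + message, message) (zip truncates to the shorter), one char per adjacent pair
def pvPairChar (p c : Char) : Char :=
  Char.ofNat (PySem.Int.mod ((c.toNat : Int) - (p.toNat : Int)) 26 + 97).toNat

def cipher26_alt (message : String) : String :=
  let l := message.toList
  String.ofList (List.zipWith pvPairChar ('a' :: l) l)

-- ===== PRECONDITION & SPEC =====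
def Spec_cipher26 (message : String) (out : String) : Prop := out = cipher26_alt message
instance (message : String) (out : String) : Decidable (Spec_cipher26 message out) := by unfold Spec_cipher26; infer_instance

-- ===== CLAIM (what is proved, stated in full; the proofs are below) =====
def Claim_equal_cipher26 : Prop := ∀ (message : String), Dom_cipher26 message → Spec_cipher26 message (cipher26 message)

-- ===== LEMMAS AND PROOFS =====

-- Same remainder when the subtracted amounts agree mod 26.
theorem pv_mod_congr (x a b : Int) (h : a % 26 = b % 26) :
    PySem.Int.mod (x - a) 26 = PySem.Int.mod (x - b) 26 := by
  rw [PySem.Int.mod_eq_emod_of_pos (by norm_num : (0:Int) < 26),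
      PySem.Int.mod_eq_emod_of_pos (by norm_num : (0:Int) < 26)]
  omega

-- Loop invariant: if A's accumulator satisfies 97 + acc0 ≡ ord(pc) (mod 26) for the
-- previous character pc, the rest of A's fold appends exactly B's adjacent-pair characters.
theorem pv_fold_eq (l : List Char) (acc0 : Int) (pc : Char) (acc : List Char)
    (h : (97 + acc0) % 26 = ((pc.toNat : Int)) % 26) :
    (l.foldl (fun (st : Int × List Char) c =>
        let d := PySem.Int.mod ((c.toNat : Int) - 97 - st.1) 26
        (st.1 + d, st.2 ++ [Char.ofNat (d + 97).toNat])) (acc0, acc)).2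
    = acc ++ List.zipWith pvPairChar (pc :: l) l := by
  induction l generalizing acc0 pc acc with
  | nil => simp
  | cons c tl ih =>
    simp only [List.foldl_cons, List.zipWith_cons_cons]
    have hd : PySem.Int.mod ((c.toNat : Int) - 97 - acc0) 26
        = PySem.Int.mod ((c.toNat : Int) - (pc.toNat : Int)) 26 := by
      have := pv_mod_congr (c.toNat : Int) (97 + acc0) (pc.toNat : Int) h
      rw [← this]; ring_nf
    rw [hd]
    have := ih (acc0 + PySem.Int.mod ((c.toNat : Int) - (pc.toNat : Int)) 26) c
      (acc ++ [Char.ofNat (PySem.Int.mod ((c.toNat : Int) - (pc.toNat : Int)) 26 + 97).toNat])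
      (by
        rw [PySem.Int.mod_eq_emod_of_pos (by norm_num : (0:Int) < 26)]
        omega)
    simp only at this ⊢
    rw [this, pvPairChar]
    simp

-- ===== VERDICT (by name: the statement is the Claim_ definition above) =====
theorem cipher26_spec : Claim_equal_cipher26 := by
  intro message _
  show cipher26 message = cipher26_alt message
  unfold cipher26 cipher26_alt
  have := pv_fold_eq message.toList 0 'a' [] (by decide)
  simp only at this ⊢
  rw [this, List.nil_append]
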